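-- pv_equiv track=rewrite | github.com/cirosantilli/project-euler-solvers | solvers/462.py | partition_3smooth
-- ===== SOURCE A (Python) =====
-- def partition_3smooth(N: int) -> list[int]:
--     """
--     Build the Young diagram shape as a partition (row lengths), where each cell corresponds
--     to a pair (a,b) with 2^a * 3^b <= N.
--
--     For each b >= 0 with 3^b <= N, the allowed a are 0..floor(log2(N/3^b)).
--     The row length therefore equals floor(log2(N/3^b)) + 1, which is bit_length(N//3^b).
--     """
--     if N < 1:
--         return []
--     rows: list[int] = []
--     pow3 = 1
--     while pow3 <= N:
--         limit = N // pow3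
--         rows.append(limit.bit_length())  # = floor(log2(limit)) + 1
--         pow3 *= 3
--
--     # Should be a partition: non-increasing row lengths.
--     for i in range(1, len(rows)):
--         assert rows[i] <= rows[i - 1]
--     return rows
-- ===== SOURCE B (Python) =====
-- def partition_3smooth(N: int) -> list[int]:
--     if N < 1:
--         return []
--     return [N.bit_length()] + partition_3smooth(N // 3)
-- ===== Notes on version B (the rewrite author's own statement) =====
-- stated objective: simpler
-- what changed: Replaced the while-loop maintaining a multiplicative pow3 accumulator (plus a no-op assertion pass) by a short recursion that peels one factor of three per call (dividing N by three), correct because floored division composes.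
import Mathlib
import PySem

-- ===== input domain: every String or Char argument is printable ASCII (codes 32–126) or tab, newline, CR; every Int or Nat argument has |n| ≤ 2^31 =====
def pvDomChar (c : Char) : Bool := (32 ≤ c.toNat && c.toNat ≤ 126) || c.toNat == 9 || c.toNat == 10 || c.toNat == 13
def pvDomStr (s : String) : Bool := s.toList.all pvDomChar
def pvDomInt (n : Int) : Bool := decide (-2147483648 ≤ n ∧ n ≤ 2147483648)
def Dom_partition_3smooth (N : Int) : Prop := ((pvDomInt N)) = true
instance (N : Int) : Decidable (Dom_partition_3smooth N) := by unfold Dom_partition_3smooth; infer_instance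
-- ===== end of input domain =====

-- B replaces A's pow3-accumulator while-loop (and its no-op assertion pass) by a recursion
-- peeling one factor of 3 per call; objective: simpler.


-- ===== PORT A =====
-- A's while loop: pow3 carries the proof 0 < pow3 (always true at the call site pow3 = 1)
-- so the loop terminates; the final assertion pass of A is observation-free and omitted.
def partition_3smooth_loop (N : Int) (pow3 : Int) (rows : List Int) (hp : 0 < pow3) : List Int :=
  if _h : pow3 ≤ N then
    partition_3smooth_loop N (pow3 * 3)
      (rows ++ [((PySem.Int.bitLength (PySem.Int.floordiv N pow3) : Nat) : Int)]) (by omega)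
  else rows
termination_by (N + 1 - pow3).toNat
decreasing_by omega

def partition_3smooth (N : Int) : List Int :=
  if N < 1 then [] else partition_3smooth_loop N 1 [] (by norm_num)

-- ===== PORT B =====
def partition_3smooth_alt (N : Int) : List Int :=
  if _h : N < 1 then []
  else ((PySem.Int.bitLength N : Nat) : Int) :: partition_3smooth_alt (PySem.Int.floordiv N 3)
termination_by N.toNat
decreasing_by
  have : PySem.Int.floordiv N 3 = N / 3 := PySem.Int.floordiv_eq_ediv_of_pos (by norm_num)
  omega

-- ===== PRECONDITION & SPEC =====
def Spec_partition_3smooth (N : Int) (out : List Int) : Prop := out = partition_3smooth_alt N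
instance (N : Int) (out : List Int) : Decidable (Spec_partition_3smooth N out) := by unfold Spec_partition_3smooth; infer_instance

-- ===== CLAIM (what is proved, stated in full; the proofs are below) =====
def Claim_equal_partition_3smooth : Prop := ∀ (N : Int), Dom_partition_3smooth N → Spec_partition_3smooth N (partition_3smooth N)

-- ===== LEMMAS AND PROOFS =====

lemma alt_of_lt_one {N : Int} (h : N < 1) : partition_3smooth_alt N = [] := by
  rw [partition_3smooth_alt]; simp [h]

lemma alt_of_ge_one {N : Int} (h : ¬ N < 1) :
    partition_3smooth_alt N =
      ((PySem.Int.bitLength N : Nat) : Int) :: partition_3smooth_alt (PySem.Int.floordiv N 3) := by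
  rw [partition_3smooth_alt]; simp [h]

lemma loop_eq_alt (N pow3 : Int) (rows : List Int) (hp : 0 < pow3) :
    partition_3smooth_loop N pow3 rows hp =
      rows ++ partition_3smooth_alt (PySem.Int.floordiv N pow3) := by
  rw [partition_3smooth_loop]
  by_cases h : pow3 ≤ N
  · simp only [h, dite_true]
    rw [loop_eq_alt N (pow3 * 3) _ (by omega)]
    have hq : PySem.Int.floordiv N pow3 = N / pow3 := PySem.Int.floordiv_eq_ediv_of_pos hp
    have hq3 : PySem.Int.floordiv N (pow3 * 3) = N / (pow3 * 3) :=
      PySem.Int.floordiv_eq_ediv_of_pos (by omega)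
    have hge : ¬ PySem.Int.floordiv N pow3 < 1 := by
      rw [hq]
      have h1 := Int.ediv_lt_iff_lt_mul (a := N) (b := 1) hp
      omega
    rw [alt_of_ge_one hge]
    have hcomp : PySem.Int.floordiv (PySem.Int.floordiv N pow3) 3 =
        PySem.Int.floordiv N (pow3 * 3) := by
      rw [hq, hq3, PySem.Int.floordiv_eq_ediv_of_pos (by norm_num : (0:Int) < 3)]
      exact Int.ediv_ediv_of_nonneg (by omega)
    rw [hcomp]
    simp
  · simp only [h, dite_false]
    have hlt : PySem.Int.floordiv N pow3 < 1 := by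
      rw [PySem.Int.floordiv_eq_ediv_of_pos hp]
      have h1 := Int.ediv_lt_iff_lt_mul (a := N) (b := 1) hp
      omega
    rw [alt_of_lt_one hlt]
    simp
termination_by (N + 1 - pow3).toNat
decreasing_by omega

-- ===== VERDICT (by name: the statement is the Claim_ definition above) =====
theorem partition_3smooth_spec : Claim_equal_partition_3smooth := by
  intro N _
  unfold Spec_partition_3smooth partition_3smooth
  by_cases h : N < 1
  · simp [h, alt_of_lt_one h]
  · simp only [h, if_false]
    rw [loop_eq_alt]
    simp [PySem.Int.floordiv]
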